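-- pv_equiv track=rewrite | github.com/juliuszelf/global-charity-search-engine | scripts/scotland/cleanCSV.py | get_values_from_address
-- ===== SOURCE A (Python) =====
-- counties = [
--         "Aberdeenshire",
--         "Angus",
--         "Argyllshire",
--         "Ayrshire",
--         "Banffshire",
--         "Moray council",
--         "Aberdeenshire council",
--         "Berwickshire",
--         "Buteshire",
--         "Caithness",
--         "Clackmannanshire",
--         "Dumfriesshire",
--         "Dumfries",
--         "Galloway)",
--         "Dunbartonshire",
--         "Lothian-Main-Page",
--         "East Lothian",
--         "Haddingtonshire",
--         "Midlothian",
--         "Fife/Fifeshire",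
--         "Inverness-shire",
--         "Kincardineshire",
--         "Kinross-shire",
--         "Perth",
--         "Kinross",
--         "Kirkcudbrightshire",
--         "Lanarkshire",
--         "Linlithgowshire",
--         "West Lothian",
--         "Midlothian",
--         "Edinburghshire",
--         "Moray",
--         "Morayshire",
--         "Elginshire",
--         "Nairnshire-Main-Page",
--         "Nairn",
--         "Nairnshire",
--         "Highland",
--         "Orkney",
--         "Peebles-shire",
--         "Borders",
--         "Perthshire",
--         "Perth",
--         "Kinross",
--         "Stirling",
--         "Renfrewshire",
--         "Ross and Cromarty",
--         "Roxburghshire",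
--         "Selkirkshire",
--         "Shetland",
--         "Stirlingshire",
--         "Sutherland",
--         "West Lothian",
--         "Linlithgowshire",
--         "Wigtownshire"
--     ]
--
-- def get_values_from_address(address):
--     '''
--     "Sports Pavilion, Pentcaitland, East Lothian"
--     "The Old Garage, Mill Hills Farm, Crieff, Perthshire"
--     "29A Westburn Drive, Aberdeen"
--     "60 Brookfield Place, Alva, Clackmannanshire"
--     "21 Church Street, Brechin, Angus"
--     "Keppochan Farmhouse, Cladich, Dalmally"
--     "Meeks Road Surgery, 10 Meeks Road, Falkirk"
--     "24 Lanark Road, Edinburgh"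
--     "6 annerley court, cuparhead, coatbridge, lanarkshire"
--     '''
--     city = ""
--     state = ""  # County / Shire
--     parts = address.split(",")
--     found_state = False
--     # we 'reverse' parts, because we expect our values
--     # to be within last 3 items.
--     for part in reversed(parts):
--         if not found_state:
--             for county in counties:
--                 if part.strip() in county:
--                     state = county.strip()
--                     found_state = True
--         else:
--             city = part.strip()
--             return city, state
--
--     # couldn't find county, lets assume city is last
--     city = address.split(",")[-1].strip()
--     return city, state
-- ===== SOURCE B (Python) =====
-- counties = [
--         "Aberdeenshire",
--         "Angus",
--         "Argyllshire",
--         "Ayrshire",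
--         "Banffshire",
--         "Moray council",
--         "Aberdeenshire council",
--         "Berwickshire",
--         "Buteshire",
--         "Caithness",
--         "Clackmannanshire",
--         "Dumfriesshire",
--         "Dumfries",
--         "Galloway)",
--         "Dunbartonshire",
--         "Lothian-Main-Page",
--         "East Lothian",
--         "Haddingtonshire",
--         "Midlothian",
--         "Fife/Fifeshire",
--         "Inverness-shire",
--         "Kincardineshire",
--         "Kinross-shire",
--         "Perth",
--         "Kinross",
--         "Kirkcudbrightshire",
--         "Lanarkshire",
--         "Linlithgowshire",
--         "West Lothian",
--         "Midlothian",
--         "Edinburghshire",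
--         "Moray",
--         "Morayshire",
--         "Elginshire",
--         "Nairnshire-Main-Page",
--         "Nairn",
--         "Nairnshire",
--         "Highland",
--         "Orkney",
--         "Peebles-shire",
--         "Borders",
--         "Perthshire",
--         "Perth",
--         "Kinross",
--         "Stirling",
--         "Renfrewshire",
--         "Ross and Cromarty",
--         "Roxburghshire",
--         "Selkirkshire",
--         "Shetland",
--         "Stirlingshire",
--         "Sutherland",
--         "West Lothian",
--         "Linlithgowshire",
--         "Wigtownshire"
--     ]
--
-- def get_values_from_address(address):
--     # Single forward pass: remember, for the last part that matches a county,
--     # the part immediately before it and the (last) matching county.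
--     parts = address.split(",")
--     prev = None
--     best = None  # (part before the matched part or None, matched county)
--     for part in parts:
--         match = None
--         for county in counties:
--             if part.strip() in county:
--                 match = county
--         if match is not None:
--             best = (prev, match)
--         prev = part
--     if best is None:
--         return parts[-1].strip(), ""
--     before, county = best
--     city = before.strip() if before is not None else parts[-1].strip()
--     return city, county.strip()
-- ===== Notes on version B (the rewrite author's own statement) =====
-- stated objective: simpler
-- what changed: Replaces the reverse scan with a found-flag and early return by one forward pass that keeps an accumulator (previous part, last matching county); the answer is assembled once after the loop.
import Mathlib
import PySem

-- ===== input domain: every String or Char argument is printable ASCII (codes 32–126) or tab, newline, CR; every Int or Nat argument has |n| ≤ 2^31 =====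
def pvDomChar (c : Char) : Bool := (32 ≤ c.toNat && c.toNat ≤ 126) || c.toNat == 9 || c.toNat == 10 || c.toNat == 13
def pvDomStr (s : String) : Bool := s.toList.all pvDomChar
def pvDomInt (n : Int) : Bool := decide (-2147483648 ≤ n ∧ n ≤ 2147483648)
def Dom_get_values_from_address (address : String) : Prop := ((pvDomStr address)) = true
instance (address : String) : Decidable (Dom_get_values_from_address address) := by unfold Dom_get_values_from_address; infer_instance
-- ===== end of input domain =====

-- B replaces A's reverse scan with found-flag and early return by a single forward
-- pass keeping (previous part, last matching county); same cost, plainer control flow.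

-- module-level constant shared by both Pythons
def counties : List String := ["Aberdeenshire", "Angus", "Argyllshire", "Ayrshire", "Banffshire", "Moray council", "Aberdeenshire council", "Berwickshire", "Buteshire", "Caithness", "Clackmannanshire", "Dumfriesshire", "Dumfries", "Galloway)", "Dunbartonshire", "Lothian-Main-Page", "East Lothian", "Haddingtonshire", "Midlothian", "Fife/Fifeshire", "Inverness-shire", "Kincardineshire", "Kinross-shire", "Perth", "Kinross", "Kirkcudbrightshire", "Lanarkshire", "Linlithgowshire", "West Lothian", "Midlothian", "Edinburghshire", "Moray", "Morayshire", "Elginshire", "Nairnshire-Main-Page", "Nairn", "Nairnshire", "Highland", "Orkney", "Peebles-shire", "Borders", "Perthshire", "Perth", "Kinross", "Stirling", "Renfrewshire", "Ross and Cromarty", "Roxburghshire", "Selkirkshire", "Shetland", "Stirlingshire", "Sutherland", "West Lothian", "Linlithgowshire", "Wigtownshire"]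

-- ===== PORT A =====
-- the reversed-parts loop of A: returns (some (city, state), _) on the early
-- `return city, state`, or (none, state) when the loop runs to completion
def aLoop : List String → String → Bool → Option (String × String) × String
  | [], state, _ => (none, state)
  | part :: rest, state, found =>
    if found then
      (some (PySem.Str.strip part, state), state)
    else
      aLoop rest
        (counties.foldl (fun (acc : String × Bool) county =>
          if PySem.Str.isIn (PySem.Str.strip part) county then (PySem.Str.strip county, true) else acc)
          (state, found)).1
        (counties.foldl (fun (acc : String × Bool) county =>
          if PySem.Str.isIn (PySem.Str.strip part) county then (PySem.Str.strip county, true) else acc)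
          (state, found)).2

def get_values_from_address (address : String) : String × String :=
  let state := ""
  let parts := (PySem.Str.split? address ",").getD []
  match aLoop parts.reverse state false with
  | (some res, _) => res
  | (none, st) =>
    -- couldn't find county: city = address.split(",")[-1].strip()  (split is never empty)
    (PySem.Str.strip (PySem.List.pyGetD ((PySem.Str.split? address ",").getD []) (-1) ""), st)

-- ===== PORT B =====
-- inner scan of B: the last county that contains part.strip(), if any
def bMatch (part : String) : Option String :=
  counties.foldl (fun m county =>
    if PySem.Str.isIn (PySem.Str.strip part) county then some county else m) none

-- forward pass: accumulator (prev part, best = (part before last match, matched county))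
def bLoop (parts : List String) : Option String × Option (Option String × String) :=
  parts.foldl (fun acc part =>
    (some part,
     match bMatch part with
     | some c => some (acc.1, c)
     | none => acc.2)) (none, none)

def get_values_from_address_alt (address : String) : String × String :=
  let parts := (PySem.Str.split? address ",").getD []
  match (bLoop parts).2 with
  | none => (PySem.Str.strip (PySem.List.pyGetD parts (-1) ""), "")
  | some (before, county) =>
    let city := match before with
      | some b => PySem.Str.strip b
      | none => PySem.Str.strip (PySem.List.pyGetD parts (-1) "")
    (city, PySem.Str.strip county)

-- ===== PRECONDITION & SPEC =====
def Spec_get_values_from_address (address : String) (out : String × String) : Prop := out = get_values_from_address_alt address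
instance (address : String) (out : String × String) : Decidable (Spec_get_values_from_address address out) := by unfold Spec_get_values_from_address; infer_instance

-- ===== CLAIM (what is proved, stated in full; the proofs are below) =====
def Claim_equal_get_values_from_address : Prop := ∀ (address : String), Dom_get_values_from_address address → Spec_get_values_from_address address (get_values_from_address address)

-- ===== LEMMAS AND PROOFS =====

-- the A-side inner county scan, started unfound, is determined by B's bMatch scan
lemma inner_scan (cs : List String) (p st : String) (m : Option String) :
    cs.foldl (fun (acc : String × Bool) county =>
        if PySem.Str.isIn (PySem.Str.strip p) county then (PySem.Str.strip county, true) else acc)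
      (match m with | some c => (PySem.Str.strip c, true) | none => (st, false))
    = (match cs.foldl (fun m county =>
          if PySem.Str.isIn (PySem.Str.strip p) county then some county else m) m with
        | some c => (PySem.Str.strip c, true) | none => (st, false)) := by
  induction cs generalizing m with
  | nil => rfl
  | cons c cs ih =>
    simp only [List.foldl_cons]
    by_cases h : PySem.Str.isIn (PySem.Str.strip p) c = true
    · rw [if_pos h, if_pos h]
      exact ih (some c)
    · rw [if_neg h, if_neg h]
      exact ih m

-- once found, A's loop returns the next part's strip immediately (or finishes)
lemma aLoop_found (r : List String) (st : String) :
    aLoop r st true = match r with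
      | [] => (none, st)
      | p :: _ => (some (PySem.Str.strip p, st), st) := by
  cases r <;> rfl

lemma bLoop_fst (l : List String) : (bLoop l).1 = l.getLast? := by
  induction l using List.reverseRecOn with
  | nil => rfl
  | append_singleton l x ih => simp [bLoop, List.foldl_append]

-- the central correspondence: A's reverse loop vs B's forward accumulator
lemma aLoop_eq_bLoop (l : List String) :
    aLoop l.reverse "" false =
      match (bLoop l).2 with
      | none => (none, "")
      | some (before, c) =>
        match before with
        | some b => (some (PySem.Str.strip b, PySem.Str.strip c), PySem.Str.strip c)
        | none => (none, PySem.Str.strip c) := by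
  induction l using List.reverseRecOn with
  | nil => rfl
  | append_singleton l x ih =>
    have hb : (bLoop (l ++ [x])).2 =
        match bMatch x with
        | some c => some ((bLoop l).1, c)
        | none => (bLoop l).2 := by
      simp only [bLoop, bMatch, List.foldl_append, List.foldl_cons, List.foldl_nil]
    have hinner := inner_scan counties x "" none
    rw [List.reverse_append, List.reverse_singleton, List.singleton_append]
    rw [show aLoop (x :: l.reverse) "" false =
        aLoop l.reverse
          (counties.foldl (fun (acc : String × Bool) county =>
            if PySem.Str.isIn (PySem.Str.strip x) county then (PySem.Str.strip county, true) else acc)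
            ("", false)).1
          (counties.foldl (fun (acc : String × Bool) county =>
            if PySem.Str.isIn (PySem.Str.strip x) county then (PySem.Str.strip county, true) else acc)
            ("", false)).2 from rfl]
    simp only [bMatch] at hb
    cases hm : counties.foldl (fun m county =>
        if PySem.Str.isIn (PySem.Str.strip x) county then some county else m) none with
    | none =>
      rw [hm] at hinner hb
      rw [hinner, hb]
      exact ih
    | some c =>
      rw [hm] at hinner hb
      rw [hinner, hb, aLoop_found, bLoop_fst]
      cases hl : l.getLast? with
      | none =>
        have : l = [] := List.getLast?_eq_none_iff.mp hl
        subst this; rfl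
      | some p =>
        have hrev : l.reverse.head? = some p := by
          rw [List.head?_reverse]; exact hl
        cases hr : l.reverse with
        | nil => simp [hr] at hrev
        | cons q t =>
          rw [hr] at hrev
          simp only [List.head?_cons, Option.some.injEq] at hrev
          subst hrev
          rfl

-- ===== VERDICT (by name: the statement is the Claim_ definition above) =====
theorem get_values_from_address_spec : Claim_equal_get_values_from_address := by
  intro address _
  unfold Spec_get_values_from_address
  show get_values_from_address address = get_values_from_address_alt address
  simp only [get_values_from_address, get_values_from_address_alt]
  rw [aLoop_eq_bLoop]
  cases h : (bLoop ((PySem.Str.split? address ",").getD [])).2 with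
  | none => rfl
  | some bc =>
    obtain ⟨before, c⟩ := bc
    cases before <;> rfl
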